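-- pv_equiv track=rewrite | github.com/neoyogi/onepk | onepk_without_pyc/onep/policyservice/match.py | _thrift_to_hex_array
-- ===== SOURCE A (Python) =====
-- def _thrift_to_hex_array(mac_address):
--     if mac_address == None:
--         return (0, None)
--     mac_hex_array = list()
--     item_pos = 0
--     for item in mac_address:
--         item_pos += 1
--         if item > 127 or item < -128:
--             return (item_pos, None)
--         if item < 0:
--             mac_hex_array.append(hex(item + 256))
--         else:
--             mac_hex_array.append(hex(item))
--
--     return (0, mac_hex_array)
-- ===== SOURCE B (Python) =====
-- def _thrift_to_hex_array(mac_address):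
--     if mac_address is None:
--         return (0, None)
--     for i, item in enumerate(mac_address, 1):
--         if not -128 <= item <= 127:
--             return (i, None)
--     return (0, [hex(b % 256) for b in mac_address])
-- ===== Notes on version B (the rewrite author's own statement) =====
-- stated objective: simpler
-- what changed: Replaced the single interleaved validate-and-convert loop with accumulator by a validation pass (enumerate) followed by a list comprehension converting via b % 256, which unifies the negative/non-negative branches.
import Mathlib
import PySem

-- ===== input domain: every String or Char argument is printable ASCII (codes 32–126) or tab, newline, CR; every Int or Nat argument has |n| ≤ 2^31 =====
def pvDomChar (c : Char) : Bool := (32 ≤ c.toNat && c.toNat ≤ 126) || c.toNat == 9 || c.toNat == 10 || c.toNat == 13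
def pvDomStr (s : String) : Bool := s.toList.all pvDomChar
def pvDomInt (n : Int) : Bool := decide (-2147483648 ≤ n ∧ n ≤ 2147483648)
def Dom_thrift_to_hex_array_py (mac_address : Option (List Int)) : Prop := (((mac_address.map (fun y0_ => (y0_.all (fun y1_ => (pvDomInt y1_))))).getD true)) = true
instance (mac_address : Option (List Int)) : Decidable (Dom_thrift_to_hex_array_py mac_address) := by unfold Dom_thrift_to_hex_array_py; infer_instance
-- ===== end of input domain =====

-- B replaces A's interleaved validate-and-convert loop by a validation pass followed
-- by a `b % 256` conversion comprehension (objective: simpler).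

-- shared helper: Python's hex(n) for a non-negative int (both programs only call it on 0..255)
def pyHexDigit (n : Nat) : Char := if n < 10 then Char.ofNat (48 + n) else Char.ofNat (87 + n)

def pyHexNat : Nat → List Char
  | 0 => []
  | n + 1 => pyHexNat ((n + 1) / 16) ++ [pyHexDigit ((n + 1) % 16)]
decreasing_by exact Nat.div_lt_self (Nat.succ_pos n) (by omega)

def pyHex (n : Int) : String := "0x" ++ String.mk (if n = 0 then ['0'] else pyHexNat n.toNat)

-- ===== PORT A =====
-- A's loop: item_pos counter, appended accumulator, early return on out-of-range
def thriftLoopA : List Int → Int → List String → Int × Option (List String)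
  | [], _, acc => (0, some acc)
  | item :: rest, item_pos, acc =>
    let item_pos := item_pos + 1
    if item > 127 ∨ item < -128 then (item_pos, none)
    else if item < 0 then thriftLoopA rest item_pos (acc ++ [pyHex (item + 256)])
    else thriftLoopA rest item_pos (acc ++ [pyHex item])

def thrift_to_hex_array_py (mac_address : Option (List Int)) : Int × Option (List String) :=
  match mac_address with
  | none => (0, none)
  | some l => thriftLoopA l 0 []

-- ===== PORT B =====
-- B's validation pass: first out-of-range 1-based position, if any
def thriftValidate : List Int → Int → Option Int
  | [], _ => none
  | item :: rest, i => if ¬ (-128 ≤ item ∧ item ≤ 127) then some i else thriftValidate rest (i + 1)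

def thrift_to_hex_array_py_alt (mac_address : Option (List Int)) : Int × Option (List String) :=
  match mac_address with
  | none => (0, none)
  | some l =>
    match thriftValidate l 1 with
    | some i => (i, none)
    | none => (0, some (l.map (fun b => pyHex (PySem.Int.mod b 256))))

-- ===== PRECONDITION & SPEC =====
def Spec_thrift_to_hex_array_py (mac_address : Option (List Int)) (out : Int × Option (List String)) : Prop := out = thrift_to_hex_array_py_alt mac_address
instance (mac_address : Option (List Int)) (out : Int × Option (List String)) : Decidable (Spec_thrift_to_hex_array_py mac_address out) := by unfold Spec_thrift_to_hex_array_py; infer_instance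

-- ===== CLAIM (what is proved, stated in full; the proofs are below) =====
def Claim_equal_thrift_to_hex_array_py : Prop := ∀ (mac_address : Option (List Int)), Dom_thrift_to_hex_array_py mac_address → Spec_thrift_to_hex_array_py mac_address (thrift_to_hex_array_py mac_address)

-- ===== LEMMAS AND PROOFS =====

theorem thriftLoopA_eq (l : List Int) (pos : Int) (acc : List String) :
    thriftLoopA l pos acc =
      match thriftValidate l (pos + 1) with
      | some i => (i, none)
      | none => (0, some (acc ++ l.map (fun b => pyHex (PySem.Int.mod b 256)))) := by
  induction l generalizing pos acc with
  | nil => simp [thriftLoopA, thriftValidate]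
  | cons item rest ih =>
    simp only [thriftLoopA, thriftValidate]
    by_cases hbad : item > 127 ∨ item < -128
    · have : ¬ (-128 ≤ item ∧ item ≤ 127) := by omega
      simp [hbad, this]
    · have hok : -128 ≤ item ∧ item ≤ 127 := by omega
      by_cases hneg : item < 0
      · have hm : item % 256 = item + 256 := by omega
        simp [hbad, hok, hneg, ih, hm, List.append_assoc]
      · have hm : item % 256 = item := by omega
        simp [hbad, hok, hneg, ih, hm, List.append_assoc]

-- ===== VERDICT (by name: the statement is the Claim_ definition above) =====
theorem thrift_to_hex_array_py_spec : Claim_equal_thrift_to_hex_array_py := by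
  intro mac_address _
  unfold Spec_thrift_to_hex_array_py thrift_to_hex_array_py thrift_to_hex_array_py_alt
  cases mac_address with
  | none => rfl
  | some l => simpa using thriftLoopA_eq l 0 []
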